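-- pv_equiv track=rewrite | github.com/qroam/web-document-discourse-parsing | visualization/structure_generator_new.py | get_continue_block
-- ===== SOURCE A (Python) =====
-- def get_continue_block(node_id, structure_dict, previous_relation_list):
--     children_nodes = structure_dict[node_id]
--     if children_nodes == []:
--         return []
--     previous_relations = [previous_relation_list[i] for i in children_nodes][1:]
--     continue_block = []
--     buffer = [children_nodes[0]]
--     for i, relation in enumerate(previous_relations):
--         if relation != 1:
--             buffer.append(children_nodes[i + 1])
--         else:
--             continue_block.append(buffer)
--             buffer = [children_nodes[i + 1]]
--     continue_block.append(buffer)
--     return continue_block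
-- ===== SOURCE B (Python) =====
-- def get_continue_block(node_id, structure_dict, previous_relation_list):
--     # Right-to-left single scan: prepend each child to the current block and
--     # close the block whenever the child's previous-relation is 1.
--     res = []
--     cur = []
--     for c in reversed(structure_dict[node_id]):
--         cur = [c] + cur
--         if previous_relation_list[c] == 1:
--             res = [cur] + res
--             cur = []
--     if cur:
--         res = [cur] + res
--     return res
-- ===== Notes on version B (the rewrite author's own statement) =====
-- stated objective: simpler
-- what changed: B replaces A's precomputed relation list, enumerate with index arithmetic and a running buffer appended at the end by a single right-to-left scan that prepends each child to the current block and closes a block exactly when the child's previous-relation is 1 (no [1:] slice, no empty-children guard, no index arithmetic).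
import Mathlib
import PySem

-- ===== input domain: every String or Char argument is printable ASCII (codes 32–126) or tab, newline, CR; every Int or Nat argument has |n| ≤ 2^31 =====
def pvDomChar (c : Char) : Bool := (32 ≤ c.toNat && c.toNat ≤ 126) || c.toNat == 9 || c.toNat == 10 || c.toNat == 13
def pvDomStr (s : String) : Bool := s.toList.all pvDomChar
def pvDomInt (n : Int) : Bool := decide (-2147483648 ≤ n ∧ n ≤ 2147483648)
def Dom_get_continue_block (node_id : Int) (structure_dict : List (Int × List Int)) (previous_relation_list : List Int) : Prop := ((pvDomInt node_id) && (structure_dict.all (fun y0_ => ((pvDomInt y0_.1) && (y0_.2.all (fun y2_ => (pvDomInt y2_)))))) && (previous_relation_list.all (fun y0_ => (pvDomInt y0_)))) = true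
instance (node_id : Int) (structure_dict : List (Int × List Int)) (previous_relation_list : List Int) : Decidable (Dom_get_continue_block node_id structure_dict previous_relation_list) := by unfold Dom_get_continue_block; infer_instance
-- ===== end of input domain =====

-- B replaces A's left-to-right buffer loop (precomputed relation list, enumerate, index
-- arithmetic) by a single right-to-left scan that prepends and closes blocks; same values.

-- ===== PORT A =====
def get_continue_block (node_id : Int) (structure_dict : List (Int × List Int)) (previous_relation_list : List Int) : List (List Int) :=
  let children_nodes := ((PySem.Dict.mk structure_dict).get? node_id).getD []
  if children_nodes = [] then []
  else
    let previous_relations := (children_nodes.map (fun i => (PySem.List.pyGet? previous_relation_list i).getD 0)).drop 1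
    let st := (PySem.List.enumerate previous_relations).foldl
      (fun (acc : List (List Int) × List Int) p =>
        if p.2 ≠ 1 then
          (acc.1, acc.2 ++ [(PySem.List.pyGet? children_nodes (p.1 + 1)).getD 0])
        else
          (acc.1 ++ [acc.2], [(PySem.List.pyGet? children_nodes (p.1 + 1)).getD 0]))
      ([], [(PySem.List.pyGet? children_nodes 0).getD 0])
    st.1 ++ [st.2]

-- ===== PORT B =====
def get_continue_block_alt (node_id : Int) (structure_dict : List (Int × List Int)) (previous_relation_list : List Int) : List (List Int) :=
  let st := (((PySem.Dict.mk structure_dict).get? node_id).getD []).reverse.foldl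
    (fun (acc : List (List Int) × List Int) c =>
      let cur := [c] ++ acc.2
      if (PySem.List.pyGet? previous_relation_list c).getD 0 = 1 then ([cur] ++ acc.1, ([] : List Int))
      else (acc.1, cur))
    ([], [])
  if st.2 = [] then st.1 else [st.2] ++ st.1

-- ===== PRECONDITION & SPEC =====
-- Pre_ excludes exactly where Python A raises: KeyError (node_id not a key) and IndexError
-- (some child index out of range of previous_relation_list).
def Pre_get_continue_block (node_id : Int) (structure_dict : List (Int × List Int)) (previous_relation_list : List Int) : Prop :=
  ((PySem.Dict.mk structure_dict).get? node_id).isSome ∧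
  ∀ c ∈ ((PySem.Dict.mk structure_dict).get? node_id).getD [],
    PySem.Raise.InRange previous_relation_list.length c
instance (node_id : Int) (structure_dict : List (Int × List Int)) (previous_relation_list : List Int) : Decidable (Pre_get_continue_block node_id structure_dict previous_relation_list) := by unfold Pre_get_continue_block; infer_instance

def pvWitness_get_continue_block : Int × (List (Int × List Int)) × List Int := (1, [(1, [0, 1, 2])], [0, 0, 1])

def Spec_get_continue_block (node_id : Int) (structure_dict : List (Int × List Int)) (previous_relation_list : List Int) (out : List (List Int)) : Prop := out = get_continue_block_alt node_id structure_dict previous_relation_list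
instance (node_id : Int) (structure_dict : List (Int × List Int)) (previous_relation_list : List Int) (out : List (List Int)) : Decidable (Spec_get_continue_block node_id structure_dict previous_relation_list out) := by unfold Spec_get_continue_block; infer_instance

-- ===== CLAIM (what is proved, stated in full; the proofs are below) =====
def Claim_equal_get_continue_block : Prop := ∀ (node_id : Int) (structure_dict : List (Int × List Int)) (previous_relation_list : List Int), Dom_get_continue_block node_id structure_dict previous_relation_list → Pre_get_continue_block node_id structure_dict previous_relation_list → Spec_get_continue_block node_id structure_dict previous_relation_list (get_continue_block node_id structure_dict previous_relation_list)

-- ===== LEMMAS AND PROOFS =====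

-- the canonical grouping both loops compute: close the running block before any c with relation 1
def pvGrp (prl : List Int) (buf : List Int) : List Int → List (List Int)
  | [] => [buf]
  | c :: cs =>
      if (PySem.List.pyGet? prl c).getD 0 = 1 then buf :: pvGrp prl [c] cs
      else pvGrp prl (buf ++ [c]) cs

-- the step of A's loop, with the element itself instead of the index lookup
def pvStepA (prl : List Int) (acc : List (List Int) × List Int) (c : Int) : List (List Int) × List Int :=
  if (PySem.List.pyGet? prl c).getD 0 ≠ 1 then (acc.1, acc.2 ++ [c]) else (acc.1 ++ [acc.2], [c])

-- the step of B's loop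
def pvStepB (prl : List Int) (acc : List (List Int) × List Int) (c : Int) : List (List Int) × List Int :=
  if (PySem.List.pyGet? prl c).getD 0 = 1 then ([[c] ++ acc.2] ++ acc.1, ([] : List Int)) else (acc.1, [c] ++ acc.2)

lemma pv_enumerate_map {α β : Type} (f : α → β) (l : List α) (s : Int) :
    PySem.List.enumerate (l.map f) s = (PySem.List.enumerate l s).map (fun p => (p.1, f p.2)) := by
  induction l generalizing s with
  | nil => simp [PySem.List.enumerate_nil]
  | cons x xs ih => simp [PySem.List.enumerate_cons, ih]

lemma pv_foldlA_eq (prl : List Int) (c0 : Int) (rest : List Int) (init : List (List Int) × List Int) :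
    (PySem.List.enumerate (((c0 :: rest).map (fun i => (PySem.List.pyGet? prl i).getD 0)).drop 1)).foldl
      (fun (acc : List (List Int) × List Int) p =>
        if p.2 ≠ 1 then
          (acc.1, acc.2 ++ [(PySem.List.pyGet? (c0 :: rest) (p.1 + 1)).getD 0])
        else
          (acc.1 ++ [acc.2], [(PySem.List.pyGet? (c0 :: rest) (p.1 + 1)).getD 0])) init
    = rest.foldl (pvStepA prl) init := by
  have h1 : ((c0 :: rest).map (fun i => (PySem.List.pyGet? prl i).getD 0)).drop 1
      = rest.map (fun i => (PySem.List.pyGet? prl i).getD 0) := by simp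
  rw [h1, pv_enumerate_map, List.foldl_map]
  have h2 : rest.foldl (pvStepA prl) init
      = (PySem.List.enumerate rest).foldl (fun acc p => pvStepA prl acc p.2) init := by
    conv_lhs => rw [← PySem.List.map_snd_enumerate rest 0]
    rw [List.foldl_map]
  rw [h2]
  apply PySem.List.foldl_congr_mem
  intro acc p hp
  rcases (PySem.List.mem_enumerate_iff _ _ _).1 hp with ⟨k, hk, rfl⟩
  have hg : PySem.List.pyGet? (c0 :: rest) ((0 + (k : Int)) + 1) = some rest[k] := by
    have : (0 + (k : Int)) + 1 = ((k : Int) + 1) := by ring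
    rw [this, PySem.List.pyGet?_cons_succ, PySem.List.pyGet?_natCast]
    simp [List.getElem?_eq_getElem hk]
  simp only [hg, pvStepA, Option.getD_some]

lemma pv_foldlA_grp (prl : List Int) (l : List Int) :
    ∀ (cb : List (List Int)) (buf : List Int),
      (l.foldl (pvStepA prl) (cb, buf)).1 ++ [(l.foldl (pvStepA prl) (cb, buf)).2]
        = cb ++ pvGrp prl buf l := by
  induction l with
  | nil => intro cb buf; simp [pvGrp]
  | cons c cs ih =>
      intro cb buf
      by_cases h : (PySem.List.pyGet? prl c).getD 0 = 1
      · simp [List.foldl_cons, pvStepA, h, pvGrp, ih]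
      · simp [List.foldl_cons, pvStepA, h, pvGrp, ih]

lemma pv_foldrB_grp (prl : List Int) (cs : List Int) :
    ∀ buf : List Int,
      pvGrp prl buf cs
        = (buf ++ (cs.foldr (fun c acc => pvStepB prl acc c) ([], [])).2)
            :: (cs.foldr (fun c acc => pvStepB prl acc c) ([], [])).1 := by
  induction cs with
  | nil => intro buf; simp [pvGrp]
  | cons c cs ih =>
      intro buf
      by_cases h : (PySem.List.pyGet? prl c).getD 0 = 1
      · simp [pvGrp, h, List.foldr_cons, pvStepB, ih [c]]
      · simp [pvGrp, h, List.foldr_cons, pvStepB, ih (buf ++ [c])]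

-- both ports as functions of the children list
lemma pv_main (prl : List Int) (cs : List Int) :
    (if cs = [] then []
     else
      let st := (PySem.List.enumerate ((cs.map (fun i => (PySem.List.pyGet? prl i).getD 0)).drop 1)).foldl
        (fun (acc : List (List Int) × List Int) p =>
          if p.2 ≠ 1 then (acc.1, acc.2 ++ [(PySem.List.pyGet? cs (p.1 + 1)).getD 0])
          else (acc.1 ++ [acc.2], [(PySem.List.pyGet? cs (p.1 + 1)).getD 0]))
        ([], [(PySem.List.pyGet? cs 0).getD 0])
      st.1 ++ [st.2])
    = (let st := cs.reverse.foldl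
        (fun (acc : List (List Int) × List Int) c =>
          let cur := [c] ++ acc.2
          if (PySem.List.pyGet? prl c).getD 0 = 1 then ([cur] ++ acc.1, ([] : List Int))
          else (acc.1, cur)) ([], [])
       if st.2 = [] then st.1 else [st.2] ++ st.1) := by
  have hB : ∀ l : List Int,
      l.reverse.foldl
        (fun (acc : List (List Int) × List Int) c =>
          let cur := [c] ++ acc.2
          if (PySem.List.pyGet? prl c).getD 0 = 1 then ([cur] ++ acc.1, ([] : List Int))
          else (acc.1, cur)) ([], [])
      = l.foldr (fun c acc => pvStepB prl acc c) ([], []) := by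
    intro l
    rw [List.foldl_reverse]
    simp only [pvStepB]
  cases cs with
  | nil => simp
  | cons c0 rest =>
      simp only [if_neg (List.cons_ne_nil c0 rest)]
      rw [hB]
      have hA : (PySem.List.pyGet? (c0 :: rest) (0 : Int)).getD 0 = c0 := by
        rw [PySem.List.pyGet?_zero_cons]; rfl
      rw [hA, pv_foldlA_eq prl c0 rest ([], [c0])]
      have := pv_foldlA_grp prl rest [] [c0]
      simp only [List.nil_append] at this
      rw [this, pv_foldrB_grp prl rest [c0]]
      -- compute B's final step on c0
      simp only [List.foldr_cons]
      by_cases h : (PySem.List.pyGet? prl c0).getD 0 = 1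
      · simp [pvStepB, h]
      · simp [pvStepB, h]

-- ===== VERDICT (by name: the statement is the Claim_ definition above) =====
theorem get_continue_block_spec : Claim_equal_get_continue_block := by
  intro node_id structure_dict previous_relation_list _ _
  unfold Spec_get_continue_block get_continue_block get_continue_block_alt
  exact pv_main previous_relation_list (((PySem.Dict.mk structure_dict).get? node_id).getD [])
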